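-- pv_equiv track=rewrite | github.com/yakir1991/lora-lite-phy | scripts/scan_hdr_gnu_match.py | derive_gr_gnu_from_cw
-- ===== SOURCE A (Python) =====
-- def gray_decode(v: int) -> int:
--     b = 0
--     g = v
--     while g:
--         b ^= g
--         g >>= 1
--     return b
--
-- def rows_to_inter(rows_bytes, sf_app: int):
--     # rows_bytes: 5 bytes (MSB-first) representing deinter rows
--     # returns inter[8][sf_app] with bits per column (MSB->LSB)
--     rows = [[(rows_bytes[r] >> (7 - i)) & 1 for i in range(8)] for r in range(sf_app)]
--     inter = [[0] * sf_app for _ in range(8)]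
--     for i in range(8):
--         for j in range(sf_app):
--             r = (i - j - 1) % sf_app
--             inter[i][j] = rows[r][i]
--     return inter
--
-- def derive_gr_gnu_from_cw(cw_bytes, sf: int):
--     sf_app = sf - 2
--     inter0 = rows_to_inter(cw_bytes[:5], sf_app)
--     inter1 = rows_to_inter(cw_bytes[5:10], sf_app)
--     gray0 = [int("".join(str(inter0[i][j]) for j in range(sf_app)), 2) for i in range(8)]
--     gray1 = [int("".join(str(inter1[i][j]) for j in range(sf_app)), 2) for i in range(8)]
--     gnu0 = [gray_decode(v) & ((1 << sf_app) - 1) for v in gray0]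
--     gnu1 = [gray_decode(v) & ((1 << sf_app) - 1) for v in gray1]
--     return gnu0, gnu1
-- ===== SOURCE B (Python) =====
-- def _gray(g):
--     # gray decode as recursive prefix-xor: b = g ^ (g>>1) ^ (g>>2) ^ ...
--     return 0 if g == 0 else g ^ _gray(g >> 1)
--
-- def derive_gr_gnu_from_cw(cw_bytes, sf):
--     sf_app = sf - 2
--     mask = (1 << sf_app) - 1
--
--     def half(bs):
--         out = []
--         for i in range(8):
--             g = 0
--             for j in range(sf_app):
--                 g = (g << 1) | ((bs[(i - j - 1) % sf_app] >> (7 - i)) & 1)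
--             out.append(_gray(g) & mask)
--         return out
--
--     return half(cw_bytes[:5]), half(cw_bytes[5:10])
-- ===== Notes on version B (the rewrite author's own statement) =====
-- stated objective: alternative
-- what changed: B drops A's intermediate deinterleave matrix and the binary-string join/int(s,2) round-trip, accumulating each symbol's bits directly into an integer in one pass per symbol, and gray-decodes by a recursive prefix-xor instead of A's accumulator while-loop.
-- crash fix: On sf = 2 (sf_app = 0) A raises ValueError from int("", 2) on the empty bit string for every cw_bytes, while B's empty accumulation loop returns ([0]*8, [0]*8). — e.g. on derive_gr_gnu_from_cw([], 2): A raises ValueError, B returns ([0, 0, 0, 0, 0, 0, 0, 0], [0, 0, 0, 0, 0, 0, 0, 0])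
import Mathlib
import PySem

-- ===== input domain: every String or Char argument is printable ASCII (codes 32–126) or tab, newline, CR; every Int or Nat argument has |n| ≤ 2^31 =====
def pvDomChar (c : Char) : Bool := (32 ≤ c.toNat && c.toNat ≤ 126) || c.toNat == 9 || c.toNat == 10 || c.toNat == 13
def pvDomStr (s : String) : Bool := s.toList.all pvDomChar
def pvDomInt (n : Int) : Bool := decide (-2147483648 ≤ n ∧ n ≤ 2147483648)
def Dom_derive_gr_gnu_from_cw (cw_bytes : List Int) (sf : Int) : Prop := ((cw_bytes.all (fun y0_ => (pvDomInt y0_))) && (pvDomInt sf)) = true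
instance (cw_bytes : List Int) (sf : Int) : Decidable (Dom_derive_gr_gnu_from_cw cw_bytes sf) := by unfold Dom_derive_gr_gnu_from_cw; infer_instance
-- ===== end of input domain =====

-- B fuses A's deinterleave-matrix build and binary-string round-trip into one direct
-- integer accumulation per symbol, with gray decoding as a recursive prefix-xor
-- (objective: alternative decomposition, same asymptotic cost).

-- ===== PORT A =====
-- termination measure for the `while g:` loops of both ports (cited in decreasing_by)
lemma pvShift1_toNat_lt (g : Int) (h : 0 < g) : (g >>> (1 : Nat)).toNat < g.toNat := by
  rw [Int.shiftRight_eq_div_pow]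
  norm_num
  omega

-- `while g: b ^= g; g >>= 1`.  The guard is written `0 < g`: it coincides with Python's
-- `g != 0` on every reachable call (g is a nonnegative bit-packed value and halves each
-- step; on g < 0 the Python loop would not terminate).
def pvGrayLoop (b g : Int) : Int :=
  if h : 0 < g then pvGrayLoop (PySem.Int.bxor b g) (g >>> (1 : Nat)) else b
termination_by g.toNat
decreasing_by exact pvShift1_toNat_lt g h

def gray_decode (v : Int) : Int := pvGrayLoop 0 v

def rows_to_inter (rows_bytes : List Int) (sf_app : Int) : List (List Int) :=
  let rows : List (List Int) := (PySem.List.pyRange 0 sf_app 1).map (fun (r : Int) =>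
    (PySem.List.pyRange 0 8 1).map (fun (i : Int) =>
      PySem.Int.band (PySem.List.pyGetD rows_bytes r 0 >>> (7 - i).toNat) 1))
  -- Python zero-initialises `inter` and then writes each cell (i, j) exactly once in this
  -- same double loop; ported as the nested map over the same index ranges with the assigned value.
  (PySem.List.pyRange 0 8 1).map (fun (i : Int) =>
    (PySem.List.pyRange 0 sf_app 1).map (fun (j : Int) =>
      PySem.List.pyGetD (PySem.List.pyGetD rows (PySem.Int.mod (i - j - 1) sf_app) []) i 0))

-- hand port of int(s, 2): exact on the strings reached here (nonempty sequences of the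
-- digits '0'/'1', with no sign/whitespace/underscore), where int(s, 2) is this left fold.
def pvParseBin (cs : List Char) : Int :=
  cs.foldl (fun acc c => 2 * acc + ((c.toNat : Int) - 48)) 0

def derive_gr_gnu_from_cw (cw_bytes : List Int) (sf : Int) : List Int × List Int :=
  let sf_app := sf - 2
  let inter0 := rows_to_inter (PySem.List.slice cw_bytes none (some 5)) sf_app
  let inter1 := rows_to_inter (PySem.List.slice cw_bytes (some 5) (some 10)) sf_app
  let gray0 := (PySem.List.pyRange 0 8 1).map (fun (i : Int) =>
    pvParseBin (PySem.Chars.join [] ((PySem.List.pyRange 0 sf_app 1).map (fun (j : Int) =>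
      PySem.Int.toChars (PySem.List.pyGetD (PySem.List.pyGetD inter0 i []) j 0)))))
  let gray1 := (PySem.List.pyRange 0 8 1).map (fun (i : Int) =>
    pvParseBin (PySem.Chars.join [] ((PySem.List.pyRange 0 sf_app 1).map (fun (j : Int) =>
      PySem.Int.toChars (PySem.List.pyGetD (PySem.List.pyGetD inter1 i []) j 0)))))
  -- 1 << sf_app: the shift count is a Nat; Python raises on sf_app < 0 (outside Pre_)
  let gnu0 := gray0.map (fun (v : Int) => PySem.Int.band (gray_decode v) ((1 : Int) <<< sf_app.toNat - 1))
  let gnu1 := gray1.map (fun (v : Int) => PySem.Int.band (gray_decode v) ((1 : Int) <<< sf_app.toNat - 1))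
  (gnu0, gnu1)

-- ===== PORT B =====
-- `0 if g == 0 else g ^ _gray(g >> 1)`; guard written `0 < g` (coincides with g == 0 on
-- the reachable nonnegative arguments; Python recurses forever on g < 0).
def pvGrayRec (g : Int) : Int :=
  if h : 0 < g then PySem.Int.bxor g (pvGrayRec (g >>> (1 : Nat))) else 0
termination_by g.toNat
decreasing_by exact pvShift1_toNat_lt g h

def pvHalf (bs : List Int) (sf_app mask : Int) : List Int :=
  (PySem.List.pyRange 0 8 1).map (fun (i : Int) =>
    PySem.Int.band
      (pvGrayRec ((PySem.List.pyRange 0 sf_app 1).foldl (fun g j =>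
        PySem.Int.bor (g <<< (1 : Nat))
          (PySem.Int.band (PySem.List.pyGetD bs (PySem.Int.mod (i - j - 1) sf_app) 0 >>> (7 - i).toNat) 1)) 0))
      mask)

def derive_gr_gnu_from_cw_alt (cw_bytes : List Int) (sf : Int) : List Int × List Int :=
  let sf_app := sf - 2
  let mask : Int := (1 : Int) <<< sf_app.toNat - 1
  (pvHalf (PySem.List.slice cw_bytes none (some 5)) sf_app mask,
   pvHalf (PySem.List.slice cw_bytes (some 5) (some 10)) sf_app mask)

-- ===== PRECONDITION & SPEC =====
-- Exactly the inputs on which Python A returns: with sf - 2 < 1 the bit string is empty and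
-- int("", 2) raises ValueError; with sf - 2 > 5 or fewer than 5 + (sf - 2) codeword bytes the
-- row indexing raises IndexError.
def Pre_derive_gr_gnu_from_cw (cw_bytes : List Int) (sf : Int) : Prop :=
  3 ≤ sf ∧ sf - 2 ≤ 5 ∧ 5 + (sf - 2) ≤ (cw_bytes.length : Int)
instance (cw_bytes : List Int) (sf : Int) : Decidable (Pre_derive_gr_gnu_from_cw cw_bytes sf) := by
  unfold Pre_derive_gr_gnu_from_cw; infer_instance

def pvWitness_derive_gr_gnu_from_cw : List Int × Int := ([7, 255, 0, 1, 128, 42, 9, 17, 33, 64], 7)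

-- On sf = 2 (sf_app = 0) Python A raises ValueError (int("", 2) on the empty bit string) for
-- every cw_bytes, while B's empty accumulation loop naturally returns eight 0 symbols per half.
def Raises_derive_gr_gnu_from_cw (cw_bytes : List Int) (sf : Int) : Prop := sf = 2
instance (cw_bytes : List Int) (sf : Int) : Decidable (Raises_derive_gr_gnu_from_cw cw_bytes sf) := by
  unfold Raises_derive_gr_gnu_from_cw; infer_instance
def pvRaiseWitness_derive_gr_gnu_from_cw : List Int × Int := ([], 2)
def pvRaiseWitnessOut_derive_gr_gnu_from_cw : List Int × List Int :=
  ([0, 0, 0, 0, 0, 0, 0, 0], [0, 0, 0, 0, 0, 0, 0, 0])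

def Spec_derive_gr_gnu_from_cw (cw_bytes : List Int) (sf : Int) (out : List Int × List Int) : Prop := out = derive_gr_gnu_from_cw_alt cw_bytes sf
instance (cw_bytes : List Int) (sf : Int) (out : List Int × List Int) : Decidable (Spec_derive_gr_gnu_from_cw cw_bytes sf out) := by unfold Spec_derive_gr_gnu_from_cw; infer_instance

-- ===== CLAIM (what is proved, stated in full; the proofs are below) =====
def Claim_equal_derive_gr_gnu_from_cw : Prop := ∀ (cw_bytes : List Int) (sf : Int), Dom_derive_gr_gnu_from_cw cw_bytes sf → Pre_derive_gr_gnu_from_cw cw_bytes sf → Spec_derive_gr_gnu_from_cw cw_bytes sf (derive_gr_gnu_from_cw cw_bytes sf)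

def Claim_raises_derive_gr_gnu_from_cw : Prop := (∀ (cw_bytes : List Int) (sf : Int), Dom_derive_gr_gnu_from_cw cw_bytes sf → Raises_derive_gr_gnu_from_cw cw_bytes sf → ¬ Pre_derive_gr_gnu_from_cw cw_bytes sf) ∧ (Dom_derive_gr_gnu_from_cw (pvRaiseWitness_derive_gr_gnu_from_cw.1) (pvRaiseWitness_derive_gr_gnu_from_cw.2) ∧ Raises_derive_gr_gnu_from_cw (pvRaiseWitness_derive_gr_gnu_from_cw.1) (pvRaiseWitness_derive_gr_gnu_from_cw.2) ∧ derive_gr_gnu_from_cw_alt (pvRaiseWitness_derive_gr_gnu_from_cw.1) (pvRaiseWitness_derive_gr_gnu_from_cw.2) = pvRaiseWitnessOut_derive_gr_gnu_from_cw)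

-- ===== LEMMAS AND PROOFS =====

lemma pvShift1_nonneg (g : Int) (h : 0 ≤ g) : 0 ≤ g >>> (1 : Nat) := by
  rw [Int.shiftRight_eq_div_pow]
  norm_num
  omega

lemma pvGrayRec_nonneg (n : Nat) : ∀ g : Int, g.toNat ≤ n → 0 ≤ pvGrayRec g := by
  induction n with
  | zero =>
    intro g hg
    rw [pvGrayRec]
    rw [dif_neg (by omega)]
  | succ n ih =>
    intro g hg
    rw [pvGrayRec]
    by_cases hpos : 0 < g
    · rw [dif_pos hpos]
      have h1 := pvShift1_toNat_lt g hpos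
      have h2 := pvShift1_nonneg g hpos.le
      have h3 := ih (g >>> (1 : Nat)) (by omega)
      rw [PySem.Int.bxor_of_nonneg hpos.le h3]
      exact Int.natCast_nonneg _
    · rw [dif_neg hpos]

lemma pvGrayLoop_eq (n : Nat) : ∀ b g : Int, g.toNat ≤ n → 0 ≤ b → 0 ≤ g →
    pvGrayLoop b g = PySem.Int.bxor b (pvGrayRec g) := by
  induction n with
  | zero =>
    intro b g hn hb hg
    have hneg : ¬ 0 < g := by omega
    rw [pvGrayLoop, pvGrayRec, dif_neg hneg, dif_neg hneg, PySem.Int.bxor_zero]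
  | succ n ih =>
    intro b g hn hb hg
    rw [pvGrayLoop, pvGrayRec]
    by_cases hpos : 0 < g
    · rw [dif_pos hpos, dif_pos hpos]
      have h1 := pvShift1_toNat_lt g hpos
      have h2 := pvShift1_nonneg g hg
      have hbx : 0 ≤ PySem.Int.bxor b g := by
        rw [PySem.Int.bxor_of_nonneg hb hg]; exact Int.natCast_nonneg _
      rw [ih (PySem.Int.bxor b g) (g >>> (1 : Nat)) (by omega) hbx h2]
      have hr : 0 ≤ pvGrayRec (g >>> (1 : Nat)) := pvGrayRec_nonneg n (g >>> (1 : Nat)) (by omega)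
      obtain ⟨x, rfl⟩ := Int.eq_ofNat_of_zero_le hb
      obtain ⟨y, rfl⟩ := Int.eq_ofNat_of_zero_le hg
      obtain ⟨z, hz⟩ := Int.eq_ofNat_of_zero_le hr
      rw [hz]
      simp only [PySem.Int.bxor_natCast]
      rw [Nat.xor_assoc]
    · rw [dif_neg hpos, dif_neg hpos, PySem.Int.bxor_zero]

lemma pvGray_eq (g : Int) (hg : 0 ≤ g) : gray_decode g = pvGrayRec g := by
  unfold gray_decode
  rw [pvGrayLoop_eq g.toNat 0 g le_rfl le_rfl hg, PySem.Int.bxor_comm, PySem.Int.bxor_zero]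

lemma pvBit01 (x : Int) : PySem.Int.band x 1 = 0 ∨ PySem.Int.band x 1 = 1 := by
  rw [PySem.Int.band_one]
  have h1 := PySem.Int.mod_nonneg x (b := 2) (by norm_num)
  have h2 := PySem.Int.mod_lt x (b := 2) (by norm_num)
  omega

lemma pvNat_two_mul_or_one (m : Nat) : 2 * m ||| 1 = 2 * m + 1 := by
  apply Nat.eq_of_testBit_eq; intro i
  simp only [Nat.testBit_or]
  cases i with
  | zero => simp
  | succ n =>
    simp only [Nat.testBit_succ]
    have h1 : (2 * m) / 2 = m := by omega
    have h2 : (2 * m + 1) / 2 = m := by omega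
    have h3 : (1 : Nat) / 2 = 0 := by norm_num
    simp [h1, h2, h3]

lemma pvOrAcc (g b : Int) (hg : 0 ≤ g) (hb : b = 0 ∨ b = 1) :
    PySem.Int.bor (g <<< (1 : Nat)) b = 2 * g + b := by
  have h2 : g <<< (1 : Nat) = 2 * g := by rw [Int.shiftLeft_eq]; ring
  rcases hb with rfl | rfl
  · rw [h2, PySem.Int.bor_zero]; ring
  · rw [h2, PySem.Int.bor_of_nonneg (by omega) (by norm_num)]
    have ht : (2 * g).toNat = 2 * g.toNat := by omega
    have h1 : ((1 : Int)).toNat = 1 := rfl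
    rw [ht, h1, pvNat_two_mul_or_one]
    omega

lemma pvFoldBits_eq (l : List Int) : ∀ g : Int, 0 ≤ g → (∀ x ∈ l, x = 0 ∨ x = 1) →
    l.foldl (fun g b => PySem.Int.bor (g <<< (1 : Nat)) b) g = l.foldl (fun a b => 2 * a + b) g := by
  induction l with
  | nil => intro g _ _; rfl
  | cons x xs ih =>
    intro g hg h
    simp only [List.foldl_cons]
    rw [pvOrAcc g x hg (h x (List.mem_cons_self ..))]
    exact ih _ (by rcases h x (List.mem_cons_self ..) with rfl | rfl <;> omega)
      (fun y hy => h y (List.mem_cons_of_mem _ hy))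

lemma pvFoldBits_nonneg (l : List Int) : ∀ g : Int, 0 ≤ g → (∀ x ∈ l, x = 0 ∨ x = 1) →
    0 ≤ l.foldl (fun a b => 2 * a + b) g := by
  induction l with
  | nil => intro g hg _; exact hg
  | cons x xs ih =>
    intro g hg h
    simp only [List.foldl_cons]
    exact ih _ (by rcases h x (List.mem_cons_self ..) with rfl | rfl <;> omega)
      (fun y hy => h y (List.mem_cons_of_mem _ hy))

lemma pvJoinNil_eq_flatten (ls : List (List Char)) : PySem.Chars.join [] ls = ls.flatten := by
  induction ls with
  | nil => rw [PySem.Chars.join_nil, List.flatten_nil]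
  | cons p rest ih =>
    cases rest with
    | nil => simp [PySem.Chars.join_singleton]
    | cons q rest' =>
      rw [PySem.Chars.join_cons_cons]
      simp only [List.flatten_cons] at *
      simp [ih]

lemma pvParse_flatten (bits : List Int) : ∀ a : Int, (∀ x ∈ bits, x = 0 ∨ x = 1) →
    List.foldl (fun acc c => 2 * acc + ((c.toNat : Int) - 48)) a ((bits.map PySem.Int.toChars).flatten)
      = bits.foldl (fun g b => 2 * g + b) a := by
  induction bits with
  | nil => intro a _; rfl
  | cons x xs ih =>
    intro a h
    simp only [List.map_cons, List.flatten_cons, List.foldl_append, List.foldl_cons]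
    rcases h x (List.mem_cons_self ..) with rfl | rfl
    · have h0 : PySem.Int.toChars 0 = ['0'] := by decide
      have hc0 : (('0'.toNat : Int)) = 48 := by decide
      rw [h0]
      simp only [List.foldl_cons, List.foldl_nil, hc0]
      norm_num
      exact ih _ (fun y hy => h y (List.mem_cons_of_mem _ hy))
    · have h1 : PySem.Int.toChars 1 = ['1'] := by decide
      have hc1 : (('1'.toNat : Int)) = 49 := by decide
      rw [h1]
      simp only [List.foldl_cons, List.foldl_nil, hc1]
      norm_num
      exact ih _ (fun y hy => h y (List.mem_cons_of_mem _ hy))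

lemma pvParseBin_eq (bits : List Int) (h : ∀ x ∈ bits, x = 0 ∨ x = 1) :
    pvParseBin (PySem.Chars.join [] (bits.map PySem.Int.toChars)) = bits.foldl (fun g b => 2 * g + b) 0 := by
  unfold pvParseBin
  rw [pvJoinNil_eq_flatten]
  exact pvParse_flatten bits 0 h

-- the per-cell content of A's `inter` matrix, as B reads it directly
lemma pvCell_eq (bs : List Int) (k i j : Int) (hi0 : 0 ≤ i) (hi8 : i < 8) (hj0 : 0 ≤ j) (hjk : j < k) :
    PySem.List.pyGetD (PySem.List.pyGetD (rows_to_inter bs k) i []) j 0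
      = PySem.Int.band (PySem.List.pyGetD bs (PySem.Int.mod (i - j - 1) k) 0 >>> (7 - i).toNat) 1 := by
  have hk : 0 < k := by omega
  unfold rows_to_inter
  simp only []
  rw [PySem.List.pyGetD_map_pyRange_of_nonneg _ 8 i [] hi0 hi8]
  rw [PySem.List.pyGetD_map_pyRange_of_nonneg _ k j 0 hj0 hjk]
  rw [PySem.List.pyGetD_map_pyRange_of_nonneg _ k _ [] (PySem.Int.mod_nonneg _ hk) (PySem.Int.mod_lt _ hk)]
  rw [PySem.List.pyGetD_map_pyRange_of_nonneg _ 8 i 0 hi0 hi8]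

-- one half: A's matrix + string-join + while-loop gray equals B's fused accumulation
lemma pvHalf_eq (bs : List Int) (k mask : Int) :
    ((PySem.List.pyRange 0 8 1).map (fun (i : Int) =>
        pvParseBin (PySem.Chars.join [] ((PySem.List.pyRange 0 k 1).map (fun (j : Int) =>
          PySem.Int.toChars (PySem.List.pyGetD (PySem.List.pyGetD (rows_to_inter bs k) i []) j 0)))))).map
      (fun (v : Int) => PySem.Int.band (gray_decode v) mask)
    = pvHalf bs k mask := by
  unfold pvHalf
  rw [List.map_map]
  apply List.map_congr_left
  intro i hi
  obtain ⟨hi0, hi8⟩ := PySem.List.mem_pyRange_one.mp hi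
  simp only [Function.comp]
  -- the bit stream B accumulates
  set bitB : Int → Int := fun j =>
    PySem.Int.band (PySem.List.pyGetD bs (PySem.Int.mod (i - j - 1) k) 0 >>> (7 - i).toNat) 1 with hbitB
  have hmapA : ((PySem.List.pyRange 0 k 1).map (fun (j : Int) =>
      PySem.Int.toChars (PySem.List.pyGetD (PySem.List.pyGetD (rows_to_inter bs k) i []) j 0)))
      = ((PySem.List.pyRange 0 k 1).map bitB).map PySem.Int.toChars := by
    rw [List.map_map]
    apply List.map_congr_left
    intro j hj
    obtain ⟨hj0, hjk⟩ := PySem.List.mem_pyRange_one.mp hj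
    simp only [Function.comp, hbitB]
    rw [pvCell_eq bs k i j hi0 hi8 hj0 hjk]
  have h01 : ∀ x ∈ (PySem.List.pyRange 0 k 1).map bitB, x = 0 ∨ x = 1 := by
    intro x hx
    obtain ⟨j, _, rfl⟩ := List.mem_map.mp hx
    exact pvBit01 _
  rw [hmapA, pvParseBin_eq _ h01]
  -- B's fold over the range is the fold over the mapped bit list
  have hfoldB : (PySem.List.pyRange 0 k 1).foldl (fun g j =>
      PySem.Int.bor (g <<< (1 : Nat)) (bitB j)) 0
      = ((PySem.List.pyRange 0 k 1).map bitB).foldl (fun g b => PySem.Int.bor (g <<< (1 : Nat)) b) 0 := by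
    rw [List.foldl_map]
  rw [hfoldB, pvFoldBits_eq _ 0 le_rfl h01]
  rw [pvGray_eq _ (pvFoldBits_nonneg _ 0 le_rfl h01)]

-- ===== VERDICT (by name: the statement is the Claim_ definition above) =====
theorem derive_gr_gnu_from_cw_spec : Claim_equal_derive_gr_gnu_from_cw := by
  intro cw_bytes sf _ _
  unfold Spec_derive_gr_gnu_from_cw derive_gr_gnu_from_cw derive_gr_gnu_from_cw_alt
  simp only []
  exact congrArg₂ Prod.mk (pvHalf_eq _ _ _) (pvHalf_eq _ _ _)

@[simp]
theorem derive_gr_gnu_from_cw_raises : Claim_raises_derive_gr_gnu_from_cw := by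
  unfold Claim_raises_derive_gr_gnu_from_cw
  constructor
  · intro cw_bytes sf _ hr
    unfold Raises_derive_gr_gnu_from_cw at hr
    unfold Pre_derive_gr_gnu_from_cw
    omega
  · refine ⟨by decide, by decide, ?_⟩
    show derive_gr_gnu_from_cw_alt [] 2 = _
    unfold derive_gr_gnu_from_cw_alt pvHalf pvRaiseWitnessOut_derive_gr_gnu_from_cw
    norm_num [PySem.Int.band_zero, PySem.List.pyRange_one]
    decide
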